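-- pv_equiv track=rewrite | github.com/Maria-Lipina/Hello-Python | Old list/17 my enumeration.py | ascend_filter
-- ===== SOURCE A (Python) =====
-- def ascend_filter(li:list):
--     res = [li[0]]
--     compare = li[0]
--     for i in range(1, len(li)):
--         if li[i] > compare:
--             res.append(li[i])
--             compare = li[i]
--     return res
-- ===== SOURCE B (Python) =====
-- def ascend_filter(li: list):
--     # build the prefix-maximum table first, then select in a second pass
--     rm = []
--     m = li[0]
--     for x in li:
--         if x > m:
--             m = x
--         rm.append(m)
--     return [li[0]] + [x for x, hi, lo in zip(li[1:], rm[1:], rm) if hi > lo]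
-- ===== Notes on version B (the rewrite author's own statement) =====
-- stated objective: alternative
-- what changed: A fuses selection with a running-max variable in one indexed loop; B first builds the full prefix-maximum table in one pass and then selects, in a separate zip-based pass, the positions where the table strictly increases.
import Mathlib
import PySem

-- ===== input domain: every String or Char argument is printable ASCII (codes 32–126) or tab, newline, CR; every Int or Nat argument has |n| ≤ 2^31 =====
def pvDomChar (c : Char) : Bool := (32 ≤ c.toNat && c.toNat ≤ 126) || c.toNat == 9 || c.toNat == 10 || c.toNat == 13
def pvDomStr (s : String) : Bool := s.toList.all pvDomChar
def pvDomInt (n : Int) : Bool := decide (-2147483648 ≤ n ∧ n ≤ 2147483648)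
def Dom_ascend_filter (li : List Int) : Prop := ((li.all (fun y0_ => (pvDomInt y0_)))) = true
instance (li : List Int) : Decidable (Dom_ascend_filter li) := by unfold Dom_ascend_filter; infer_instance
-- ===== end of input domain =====

-- B builds the prefix-maximum table first and then selects in a second pass; A fuses both into one
-- indexed loop with a running variable. Return values proved equal on all non-empty lists.

-- ===== PORT A =====
-- fused loop: res/compare updated together over range(1, len(li))
def ascend_filter (li : List Int) : List Int :=
  match li with
  | [] => []   -- unreachable under Pre_ (Python raises IndexError on li[0])
  | h :: _ =>
    ((PySem.List.pyRange 1 (li.length : Int) 1).foldl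
      (fun (st : List Int × Int) i =>
        if PySem.List.pyGetD li i 0 > st.2
        then (st.1 ++ [PySem.List.pyGetD li i 0], PySem.List.pyGetD li i 0)
        else st) ([h], h)).1

-- ===== PORT B =====
def ascend_filter_alt (li : List Int) : List Int :=
  match li with
  | [] => []   -- unreachable under Pre_ (Python raises IndexError on li[0])
  | h :: _ =>
    let rm := (li.foldl
      (fun (st : List Int × Int) x =>
        let m := if x > st.2 then x else st.2
        (st.1 ++ [m], m)) ([], h)).1
    h :: ((PySem.List.slice li (some 1) none).zip
            ((PySem.List.slice rm (some 1) none).zip rm)).filterMap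
          (fun p => if p.2.1 > p.2.2 then some p.1 else none)

-- ===== PRECONDITION & SPEC =====
-- A raises IndexError on the empty list (li[0]); excluded.
def Pre_ascend_filter (li : List Int) : Prop := li ≠ []
instance (li : List Int) : Decidable (Pre_ascend_filter li) := by unfold Pre_ascend_filter; infer_instance
def pvWitness_ascend_filter : List Int := [3, 1, 4, 1, 5]
def Spec_ascend_filter (li : List Int) (out : List Int) : Prop := out = ascend_filter_alt li
instance (li : List Int) (out : List Int) : Decidable (Spec_ascend_filter li out) := by unfold Spec_ascend_filter; infer_instance

-- ===== CLAIM (what is proved, stated in full; the proofs are below) =====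
def Claim_equal_ascend_filter : Prop := ∀ (li : List Int), Dom_ascend_filter li → Pre_ascend_filter li → Spec_ascend_filter li (ascend_filter li)

-- ===== LEMMAS AND PROOFS =====

-- reference recursion: elements strictly exceeding the running maximum m
def pvCore (m : Int) : List Int → List Int
  | [] => []
  | x :: xs => if x > m then x :: pvCore x xs else pvCore m xs

-- prefix-maximum table starting from m
def pvPM (m : Int) : List Int → List Int
  | [] => []
  | x :: xs => (if x > m then x else m) :: pvPM (if x > m then x else m) xs

lemma a_fold (t : List Int) : ∀ (acc : List Int) (m : Int),
    (t.foldl (fun (st : List Int × Int) x =>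
      if x > st.2 then (st.1 ++ [x], x) else st) (acc, m)).1 = acc ++ pvCore m t := by
  induction t with
  | nil => intro acc m; simp [pvCore]
  | cons x xs ih =>
    intro acc m
    by_cases h : x > m <;> simp [pvCore, h, ih]

lemma b_fold (t : List Int) : ∀ (acc : List Int) (m : Int),
    (t.foldl (fun (st : List Int × Int) x =>
      (st.1 ++ [if x > st.2 then x else st.2], if x > st.2 then x else st.2)) (acc, m))
    = (acc ++ pvPM m t, (pvPM m t).getLastD m) := by
  induction t with
  | nil => intro acc m; simp [pvPM]
  | cons x xs ih =>
    intro acc m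
    simp only [List.foldl_cons, pvPM, ih]
    cases hx : pvPM (if x > m then x else m) xs <;> simp [List.getLastD]

lemma b_select (t : List Int) : ∀ (m : Int),
    ((t.zip ((pvPM m t).zip (m :: pvPM m t))).filterMap
      (fun p : Int × Int × Int => if p.2.1 > p.2.2 then some p.1 else none)) = pvCore m t := by
  induction t with
  | nil => intro m; simp [pvCore]
  | cons x xs ih =>
    intro m
    simp only [pvPM, List.zip_cons_cons, List.filterMap_cons]
    by_cases h : x > m
    · simp [h, pvCore, ih]
    · simp [h, pvCore, ih]

-- ===== VERDICT (by name: the statement is the Claim_ definition above) =====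
theorem ascend_filter_spec : Claim_equal_ascend_filter := by
  intro li _ hpre
  unfold Spec_ascend_filter ascend_filter ascend_filter_alt
  match li with
  | [] => exact absurd rfl hpre
  | h :: t =>
    -- A side
    have hA : ((PySem.List.pyRange 1 ((h :: t).length : Int) 1).foldl
        (fun (st : List Int × Int) i =>
          if PySem.List.pyGetD (h :: t) i 0 > st.2
          then (st.1 ++ [PySem.List.pyGetD (h :: t) i 0], PySem.List.pyGetD (h :: t) i 0)
          else st) ([h], h)).1
        = [h] ++ pvCore h t := by
      rw [PySem.List.foldl_pyRange_pyGetD' (h :: t) 0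
        (fun (st : List Int × Int) x => if x > st.2 then (st.1 ++ [x], x) else st)
        ([h], h) (by omega : (0:Int) ≤ 1)]
      simpa using a_fold t [h] h
    -- B side
    have hrm : ((h :: t).foldl
        (fun (st : List Int × Int) x =>
          let m := if x > st.2 then x else st.2
          (st.1 ++ [m], m)) ([], h)).1 = h :: pvPM h t := by
      simp only [List.foldl_cons]
      rw [b_fold t]
      simp
    simp only [hA, hrm, PySem.List.slice_from_one]
    simp only [List.tail_cons]
    rw [b_select t h]
    simp
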